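-- pv_equiv track=rewrite | github.com/dyerinnovation/convene-ai | services/audio-service/src/audio_service/audio_pipeline.py | _upsample_8k_to_16k
-- ===== SOURCE A (Python) =====
-- def _upsample_8k_to_16k(samples: list[int]) -> list[int]:
--     """Upsample PCM16 samples from 8 kHz to 16 kHz via linear interpolation.
--
--     For each pair of consecutive samples, an interpolated sample is inserted
--     between them, effectively doubling the sample rate.
--
--     Args:
--         samples: List of signed 16-bit PCM values at 8 kHz.
--
--     Returns:
--         List of signed 16-bit PCM values at 16 kHz.
--     """
--     if not samples:
--         return []
--
--     out: list[int] = []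
--     for i in range(len(samples) - 1):
--         out.append(samples[i])
--         # Interpolated midpoint
--         mid = (samples[i] + samples[i + 1]) // 2
--         out.append(mid)
--     # Append last sample and duplicate it for the interpolation pair
--     out.append(samples[-1])
--     out.append(samples[-1])
--     return out
-- ===== SOURCE B (Python) =====
-- def _upsample_8k_to_16k(samples: list[int]) -> list[int]:
--     """Upsample 8 kHz PCM to 16 kHz: originals on even slots, midpoints on odd."""
--     if not samples:
--         return []
--     nxt = samples[1:] + samples[-1:]
--     mids = [(a + b) // 2 for a, b in zip(samples, nxt)]
--     out = [0] * (2 * len(samples))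
--     out[0::2] = samples
--     out[1::2] = mids
--     return out
-- ===== Notes on version B (the rewrite author's own statement) =====
-- stated objective: alternative
-- what changed: Replaces the single interleaved append loop with a prepare-then-interleave two-pass shape: a shifted 'next' array and a midpoint comprehension, then strided slice assignments into a preallocated output (the trailing duplicate falls out of padding next with the last sample).
import Mathlib
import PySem

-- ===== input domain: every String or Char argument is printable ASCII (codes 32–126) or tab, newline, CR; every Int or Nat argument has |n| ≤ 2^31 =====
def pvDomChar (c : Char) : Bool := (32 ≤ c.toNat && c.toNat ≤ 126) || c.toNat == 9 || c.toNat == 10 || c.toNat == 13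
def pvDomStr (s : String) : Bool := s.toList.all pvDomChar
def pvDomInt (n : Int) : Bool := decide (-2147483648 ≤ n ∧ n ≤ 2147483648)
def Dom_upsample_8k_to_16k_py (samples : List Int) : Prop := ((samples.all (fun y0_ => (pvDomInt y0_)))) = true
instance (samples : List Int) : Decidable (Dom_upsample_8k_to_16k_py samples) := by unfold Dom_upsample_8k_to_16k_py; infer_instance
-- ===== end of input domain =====

-- B replaces A's single interleaved append loop by a prepare-then-interleave two-pass shape
-- (shifted 'next' list, midpoint map, strided interleave of the two lists); alternative decomposition, same cost.

-- ===== PORT A =====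
def upsample_8k_to_16k_py (samples : List Int) : List Int :=
  if samples = [] then []
  else
    let out : List Int :=
      (PySem.List.pyRange 0 ((samples.length : Int) - 1) 1).foldl
        (fun out i =>
          let out := out ++ [PySem.List.pyGetD samples i 0]
          let mid := PySem.Int.floordiv
            (PySem.List.pyGetD samples i 0 + PySem.List.pyGetD samples (i + 1) 0) 2
          out ++ [mid]) []
    let out := out ++ [PySem.List.pyGetD samples (-1) 0]
    out ++ [PySem.List.pyGetD samples (-1) 0]

-- ===== PORT B =====
-- 'out[0::2] = samples; out[1::2] = mids' of Source B: the two strided slice assignments into the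
-- preallocated output are exactly this interleave of the two lists
def pvInterleave : List Int → List Int → List Int
  | a :: as, b :: bs => a :: b :: pvInterleave as bs
  | _, _ => []

def upsample_8k_to_16k_py_alt (samples : List Int) : List Int :=
  if samples = [] then []
  else
    let nxt := PySem.List.slice samples (some 1) none ++ PySem.List.slice samples (some (-1)) none
    let mids := (samples.zip nxt).map (fun p => PySem.Int.floordiv (p.1 + p.2) 2)
    pvInterleave samples mids

-- ===== PRECONDITION & SPEC =====
def Spec_upsample_8k_to_16k_py (samples : List Int) (out : List Int) : Prop := out = upsample_8k_to_16k_py_alt samples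
instance (samples : List Int) (out : List Int) : Decidable (Spec_upsample_8k_to_16k_py samples out) := by unfold Spec_upsample_8k_to_16k_py; infer_instance

-- ===== CLAIM (what is proved, stated in full; the proofs are below) =====
def Claim_equal_upsample_8k_to_16k_py : Prop := ∀ (samples : List Int), Dom_upsample_8k_to_16k_py samples → Spec_upsample_8k_to_16k_py samples (upsample_8k_to_16k_py samples)

-- ===== LEMMAS AND PROOFS =====

-- canonical form both ports are reduced to: sample then midpoint, for every consecutive pair
def pvUpCore : List Int → List Int
  | x :: y :: t => x :: PySem.Int.floordiv (x + y) 2 :: pvUpCore (y :: t)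
  | _ => []

theorem pvShift (a : Int) (l : List Int) (j : Int) (h : 0 ≤ j) :
    PySem.List.pyGetD (a :: l) (j + 1) 0 = PySem.List.pyGetD l j 0 := by
  rw [PySem.List.pyGetD_of_nonneg _ 0 (by omega), PySem.List.pyGetD_of_nonneg _ 0 h]
  have hj : (j + 1).toNat = j.toNat + 1 := by omega
  simp [hj]

theorem pvUpCore_A : ∀ (xs : List Int) (x : Int),
    (List.range xs.length).flatMap
      (fun (k : Nat) => [PySem.List.pyGetD (x :: xs) (k : Int) 0,
                 PySem.Int.floordiv
                   (PySem.List.pyGetD (x :: xs) (k : Int) 0 +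
                      PySem.List.pyGetD (x :: xs) ((k : Int) + 1) 0) 2])
      = pvUpCore (x :: xs) := by
  intro xs
  induction xs with
  | nil => intro x; simp [pvUpCore]
  | cons y t ih =>
    intro x
    rw [List.length_cons, List.range_succ_eq_map, List.flatMap_cons, List.flatMap_map]
    have hfun : ∀ k ∈ List.range t.length,
        (fun (k : Nat) => [PySem.List.pyGetD (x :: y :: t) (k : Int) 0,
            PySem.Int.floordiv (PySem.List.pyGetD (x :: y :: t) (k : Int) 0 +
              PySem.List.pyGetD (x :: y :: t) ((k : Int) + 1) 0) 2]) (Nat.succ k)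
        = [PySem.List.pyGetD (y :: t) (k : Int) 0,
            PySem.Int.floordiv (PySem.List.pyGetD (y :: t) (k : Int) 0 +
              PySem.List.pyGetD (y :: t) ((k : Int) + 1) 0) 2] := by
      intro k _
      have hc : ((Nat.succ k : Nat) : Int) = (k : Int) + 1 := by push_cast; ring
      simp only [hc]
      rw [pvShift x (y :: t) (k : Int) (Int.natCast_nonneg k),
          pvShift x (y :: t) ((k : Int) + 1) (by omega)]
    rw [List.flatMap_congr hfun, ih y]
    simp [pvUpCore, PySem.List.pyGetD]

theorem pvGetDLen : ∀ (xs : List Int) (x : Int),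
    (x :: xs).getD xs.length 0 = xs.getLastD x := by
  intro xs
  induction xs with
  | nil => intro x; rfl
  | cons y t ih =>
    intro x
    rw [List.getLastD_cons]
    exact ih y

theorem pvLastD (xs : List Int) (x : Int) :
    PySem.List.pyGetD (x :: xs) (-1) 0 = xs.getLastD x := by
  have hidx : PySem.List.pyIdx? (x :: xs).length (-1) = some xs.length := by
    simp only [PySem.List.pyIdx?, List.length_cons]
    norm_num
  simp only [PySem.List.pyGetD, PySem.List.pyGet?, hidx, ← pvGetDLen xs x]
  simp [List.getD]

theorem pvDropPenult : ∀ (xs : List Int) (x : Int),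
    (x :: xs).drop ((x :: xs).length - 1) = [xs.getLastD x] := by
  intro xs
  induction xs with
  | nil => intro x; rfl
  | cons y t ih =>
    intro x
    rw [List.getLastD_cons]
    have h := ih y
    simp only [List.length_cons, Nat.add_sub_cancel] at h ⊢
    simpa using h

theorem pvB : ∀ (xs : List Int) (x : Int),
    pvInterleave (x :: xs)
      (((x :: xs).zip (xs ++ [xs.getLastD x])).map
        (fun p => PySem.Int.floordiv (p.1 + p.2) 2))
      = pvUpCore (x :: xs) ++ [xs.getLastD x, xs.getLastD x] := by
  intro xs
  induction xs with
  | nil =>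
    intro x
    simp [pvInterleave, pvUpCore]
    omega
  | cons y t ih =>
    intro x
    rw [List.getLastD_cons]
    simp only [List.cons_append, List.zip_cons_cons, List.map_cons, pvInterleave, pvUpCore]
    rw [ih y]

-- ===== VERDICT (by name: the statement is the Claim_ definition above) =====
theorem upsample_8k_to_16k_py_spec : Claim_equal_upsample_8k_to_16k_py := by
  intro samples _
  unfold Spec_upsample_8k_to_16k_py upsample_8k_to_16k_py upsample_8k_to_16k_py_alt
  cases samples with
  | nil => rfl
  | cons x xs =>
    rw [if_neg (by simp), if_neg (by simp)]
    simp only []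
    -- A side: fold → flatMap over range → pvUpCore
    have hbody : ∀ (acc : List Int) (i : Int), i ∈ PySem.List.pyRange 0 (((x :: xs).length : Int) - 1) 1 →
        ((acc ++ [PySem.List.pyGetD (x :: xs) i 0]) ++
          [PySem.Int.floordiv (PySem.List.pyGetD (x :: xs) i 0 + PySem.List.pyGetD (x :: xs) (i + 1) 0) 2])
        = acc ++ ([PySem.List.pyGetD (x :: xs) i 0,
            PySem.Int.floordiv (PySem.List.pyGetD (x :: xs) i 0 + PySem.List.pyGetD (x :: xs) (i + 1) 0) 2]) := by
      intro acc i _; simp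
    rw [PySem.List.foldl_congr_mem _ _
      (fun acc i => acc ++ ([PySem.List.pyGetD (x :: xs) i 0,
        PySem.Int.floordiv (PySem.List.pyGetD (x :: xs) i 0 + PySem.List.pyGetD (x :: xs) (i + 1) 0) 2])) _ hbody,
    PySem.List.foldl_append_eq_flatMap]
    rw [PySem.List.pyRange_one, List.flatMap_map]
    have hlen : ((((x :: xs).length : Int) - 1) - 0).toNat = xs.length := by
      simp
    rw [hlen]
    have hz : ∀ k ∈ List.range xs.length,
        (fun (k : Nat) => [PySem.List.pyGetD (x :: xs) (0 + (k : Int)) 0,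
            PySem.Int.floordiv (PySem.List.pyGetD (x :: xs) (0 + (k : Int)) 0 +
              PySem.List.pyGetD (x :: xs) (0 + (k : Int) + 1) 0) 2]) k
        = (fun (k : Nat) => [PySem.List.pyGetD (x :: xs) ((k : Int)) 0,
            PySem.Int.floordiv (PySem.List.pyGetD (x :: xs) ((k : Int)) 0 +
              PySem.List.pyGetD (x :: xs) ((k : Int) + 1) 0) 2]) k := by
      intro k _; norm_num
    rw [List.flatMap_congr hz, pvUpCore_A xs x]
    -- B side
    rw [PySem.List.slice_from_one, PySem.List.slice_from_neg_one]
    simp only [List.tail_cons]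
    rw [pvDropPenult xs x, pvB xs x, pvLastD xs x]
    simp
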